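-- pv_equiv track=rewrite | github.com/ItsAlessandro/Royal-Chess | engine.py | bishop_fly_attacks
-- ===== SOURCE A (Python) =====
-- def bishop_fly_attacks(square: int, block : int) -> int:
--     # result attacks bitboard
--     attacks = 0
--
--     # init ranks & files
--     r = f = 0
--
--     # init target rank & files
--     tr = square // 8
--     tf = square % 8
--
--     # generate bishop attacks
--     for r, f in zip(range(tr + 1, 8), range(tf + 1, 8)):
--         attacks |= (1 << (r * 8 + f))
--         if (1 << (r * 8 + f)) & block:
--             break
--
--     for r, f in zip(range(tr - 1, -1, -1), range(tf + 1, 8)):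
--         attacks |= (1 << (r * 8 + f))
--         if (1 << (r * 8 + f)) & block:
--             break
--
--     for r, f in zip(range(tr + 1, 8), range(tf - 1, -1, -1)):
--         attacks |= (1 << (r * 8 + f))
--         if (1 << (r * 8 + f)) & block:
--             break
--
--     for r, f in zip(range(tr - 1, -1, -1), range(tf - 1, -1, -1)):
--         attacks |= (1 << (r * 8 + f))
--         if (1 << (r * 8 + f)) & block:
--             break
--
--     return attacks
-- ===== SOURCE B (Python) =====
-- def bishop_fly_attacks(square: int, block: int) -> int:
--     # Target-major line-of-sight scan: instead of casting rays outward from the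
--     # square, test each of the 64 board cells for being on a diagonal of the
--     # square with no blocker strictly between (betweens enumerated by a single
--     # strided range), and OR its bit in.
--     tr, tf = divmod(square, 8)
--     attacks = 0
--     for c in range(64):
--         r, f = divmod(c, 8)
--         if r != tr and abs(r - tr) == abs(f - tf):
--             step = (c - square) // abs(r - tr)
--             if all(not block & (1 << b) for b in range(square + step, c, step)):
--                 attacks |= 1 << c
--     return attacks
-- ===== Notes on version B (the rewrite author's own statement) =====
-- stated objective: alternative
-- what changed: Replaces A's outward ray casting (four unrolled zip-bounded loops with set-then-break) by a target-major scan: every one of the 64 board cells is tested for lying on a diagonal of the square with no blocker strictly between it and the square (betweens enumerated by one strided range), and its bit ORed in.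
-- outside the precondition, e.g. on bishop_fly_attacks(100, 0): A returns 12462221274677114660458594304, B returns 0; on bishop_fly_attacks(-9, 0): A raises ValueError, B raises ValueError
import Mathlib
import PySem

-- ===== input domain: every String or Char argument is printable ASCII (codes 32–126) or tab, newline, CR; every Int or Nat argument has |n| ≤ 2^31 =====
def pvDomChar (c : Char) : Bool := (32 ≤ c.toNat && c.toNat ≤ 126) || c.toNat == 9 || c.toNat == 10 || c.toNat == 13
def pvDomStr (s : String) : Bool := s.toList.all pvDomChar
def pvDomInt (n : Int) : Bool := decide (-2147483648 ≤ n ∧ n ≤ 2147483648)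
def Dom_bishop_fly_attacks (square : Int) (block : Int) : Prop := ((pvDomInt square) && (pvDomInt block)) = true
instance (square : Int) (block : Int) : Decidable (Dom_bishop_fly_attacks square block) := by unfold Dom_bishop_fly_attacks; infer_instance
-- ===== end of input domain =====

-- B replaces A's outward ray casting (four break-able zip loops) by a target-major
-- line-of-sight scan: every board cell is tested for lying on a diagonal of the
-- square with no blocker strictly between (alternative decomposition; same result
-- on the board domain 0 ≤ square < 64).

-- ===== PORT A =====
-- One break-able 'for r, f in zip(...)' loop body, shared by A's four loops:
-- sets the bit, breaks when it intersects block.  Shift amount r*8+f is taken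
-- via .toNat: exact whenever r*8+f ≥ 0, which Pre_ guarantees (Python raises
-- ValueError on a negative shift, outside Pre_).
def pvFlyLoop (block : Int) : List (Int × Int) → Int → Int
  | [], attacks => attacks
  | (r, f) :: rest, attacks =>
      let attacks := PySem.Int.bor attacks ((1 : Int) <<< (r * 8 + f).toNat)
      if PySem.Int.band ((1 : Int) <<< (r * 8 + f).toNat) block ≠ 0 then attacks
      else pvFlyLoop block rest attacks

def bishop_fly_attacks (square : Int) (block : Int) : Int :=
  let attacks : Int := 0
  let tr := PySem.Int.floordiv square 8
  let tf := PySem.Int.mod square 8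
  let attacks := pvFlyLoop block
    (List.zip (PySem.List.pyRange (tr + 1) 8 1) (PySem.List.pyRange (tf + 1) 8 1)) attacks
  let attacks := pvFlyLoop block
    (List.zip (PySem.List.pyRange (tr - 1) (-1) (-1)) (PySem.List.pyRange (tf + 1) 8 1)) attacks
  let attacks := pvFlyLoop block
    (List.zip (PySem.List.pyRange (tr + 1) 8 1) (PySem.List.pyRange (tf - 1) (-1) (-1))) attacks
  let attacks := pvFlyLoop block
    (List.zip (PySem.List.pyRange (tr - 1) (-1) (-1)) (PySem.List.pyRange (tf - 1) (-1) (-1))) attacks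
  attacks

-- ===== PORT B =====
-- Loop body of Source B's 'for c in range(64)': line-of-sight test for cell c.
-- Shift amounts are taken via .toNat: exact whenever the exponent is ≥ 0,
-- which holds for every c and every between-cell when 0 ≤ square < 64 (Pre_);
-- Python raises ValueError on a negative shift, outside Pre_.
def pvAltStep (square block tr tf : Int) (attacks : Int) (c : Int) : Int :=
  let r := PySem.Int.floordiv c 8
  let f := PySem.Int.mod c 8
  if r ≠ tr ∧ (r - tr).natAbs = (f - tf).natAbs then
    let step := PySem.Int.floordiv (c - square) ((r - tr).natAbs : Int)
    if (PySem.List.pyRange (square + step) c step).all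
        (fun b => PySem.Int.band block ((1 : Int) <<< b.toNat) == 0) then
      PySem.Int.bor attacks ((1 : Int) <<< c.toNat)
    else attacks
  else attacks

def bishop_fly_attacks_alt (square : Int) (block : Int) : Int :=
  let tr := PySem.Int.floordiv square 8
  let tf := PySem.Int.mod square 8
  (PySem.List.pyRange 0 64 1).foldl (pvAltStep square block tr tf) 0

-- ===== PRECONDITION & SPEC =====
-- Pre_ restricts to the natural domain: board squares 0..63. Outside it A either
-- raises ValueError (a negative shift count is reached) or returns accidental
-- off-board bitboards produced by tr = square // 8 > 7 or < 0 (see claim.json cites).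
def Pre_bishop_fly_attacks (square : Int) (block : Int) : Prop :=
  0 ≤ square ∧ square < 64
instance (square : Int) (block : Int) : Decidable (Pre_bishop_fly_attacks square block) := by
  unfold Pre_bishop_fly_attacks; infer_instance

def pvWitness_bishop_fly_attacks : Int × Int := (27, 262144)

def Spec_bishop_fly_attacks (square : Int) (block : Int) (out : Int) : Prop :=
  out = bishop_fly_attacks_alt square block
instance (square : Int) (block : Int) (out : Int) : Decidable (Spec_bishop_fly_attacks square block out) := by
  unfold Spec_bishop_fly_attacks; infer_instance

-- ===== CLAIM (what is proved, stated in full; the proofs are below) =====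
def Claim_equal_bishop_fly_attacks : Prop := ∀ (square : Int) (block : Int), Dom_bishop_fly_attacks square block → Pre_bishop_fly_attacks square block → Spec_bishop_fly_attacks square block (bishop_fly_attacks square block)

-- ===== LEMMAS AND PROOFS =====

-- Does block occupy bit p?  (the one atomic test both programs make)
def pvHit (block : Int) (p : Nat) : Bool := PySem.Int.band ((1 : Int) <<< p) block != 0

-- Canonical value of one break-able ray walk over bit positions (first hit included, rest cut).
def pvClip (block : Int) : List Nat → Nat
  | [] => 0
  | p :: tl => if pvHit block p then 1 <<< p else (1 <<< p) ||| pvClip block tl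

-- One cell with its list of between-positions, as B sees it.
def pvTerm (block : Int) (x : Nat × List Nat) : Nat :=
  if x.2.all (fun b => !pvHit block b) then 1 <<< x.1 else 0

def pvOrAll (block : Int) (l : List (Nat × List Nat)) : Nat :=
  l.foldr (fun x acc => pvTerm block x ||| acc) 0

-- The cells of one ray, each paired with the positions strictly before it on the ray.
def pvRayPairs (pre : List Nat) : List Nat → List (Nat × List Nat)
  | [] => []
  | p :: tl => (p, pre) :: pvRayPairs (pre ++ [p]) tl

def pvPos (rf : Int × Int) : Nat := (rf.1 * 8 + rf.2).toNat

-- The four position lists A walks.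
def pvPsNE (sq : Int) : List Nat :=
  (List.zip (PySem.List.pyRange (PySem.Int.floordiv sq 8 + 1) 8 1)
            (PySem.List.pyRange (PySem.Int.mod sq 8 + 1) 8 1)).map pvPos
def pvPsSE (sq : Int) : List Nat :=
  (List.zip (PySem.List.pyRange (PySem.Int.floordiv sq 8 - 1) (-1) (-1))
            (PySem.List.pyRange (PySem.Int.mod sq 8 + 1) 8 1)).map pvPos
def pvPsNW (sq : Int) : List Nat :=
  (List.zip (PySem.List.pyRange (PySem.Int.floordiv sq 8 + 1) 8 1)
            (PySem.List.pyRange (PySem.Int.mod sq 8 - 1) (-1) (-1))).map pvPos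
def pvPsSW (sq : Int) : List Nat :=
  (List.zip (PySem.List.pyRange (PySem.Int.floordiv sq 8 - 1) (-1) (-1))
            (PySem.List.pyRange (PySem.Int.mod sq 8 - 1) (-1) (-1))).map pvPos

-- The diagonal cells B accepts, with their between-position lists, in cell order.
def pvDiag (sq : Int) : List (Nat × List Nat) :=
  (PySem.List.pyRange 0 64 1).filterMap (fun c =>
    let tr := PySem.Int.floordiv sq 8
    let tf := PySem.Int.mod sq 8
    let r := PySem.Int.floordiv c 8
    let f := PySem.Int.mod c 8
    if r ≠ tr ∧ (r - tr).natAbs = (f - tf).natAbs then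
      some (c.toNat,
        (PySem.List.pyRange (sq + PySem.Int.floordiv (c - sq) ((r - tr).natAbs : Int)) c
          (PySem.Int.floordiv (c - sq) ((r - tr).natAbs : Int))).map Int.toNat)
    else none)

theorem pvOrAll_cons (block : Int) (x : Nat × List Nat) (l : List (Nat × List Nat)) :
    pvOrAll block (x :: l) = pvTerm block x ||| pvOrAll block l := rfl

theorem pvFlyLoop_clip (block : Int) :
    ∀ (cells : List (Int × Int)) (n : Nat),
      pvFlyLoop block cells (n : Int) = ((n ||| pvClip block (cells.map pvPos) : Nat) : Int) := by
  intro cells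
  induction cells with
  | nil => intro n; simp [pvFlyLoop, pvClip]
  | cons rf tl ih =>
      intro n
      obtain ⟨r, f⟩ := rf
      have hsh : (1 : Int) <<< (r * 8 + f).toNat = ((1 <<< (r * 8 + f).toNat : Nat) : Int) := by
        norm_cast
      by_cases h : PySem.Int.band ((1 : Int) <<< (r * 8 + f).toNat) block ≠ 0
      · have hh : pvHit block ((r * 8 + f).toNat) = true := by
          simpa [pvHit, bne_iff_ne] using h
        simp only [pvFlyLoop]
        rw [if_pos h]
        simp only [hsh, PySem.Int.bor_natCast, List.map_cons, pvClip, pvPos, hh, if_true]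
      · have hh : pvHit block ((r * 8 + f).toNat) = false := by
          simpa [pvHit, bne_iff_ne] using h
        simp only [pvFlyLoop]
        rw [if_neg h]
        simp only [hsh, PySem.Int.bor_natCast]
        rw [ih]
        simp only [List.map_cons, pvClip, pvPos, hh, Bool.false_eq_true, if_false, Nat.lor_assoc]

theorem pvAlt_orAll (square block tr tf : Int) :
    ∀ (l : List Int) (n : Nat),
      l.foldl (pvAltStep square block tr tf) (n : Int)
        = ((n ||| pvOrAll block (l.filterMap (fun c =>
            let r := PySem.Int.floordiv c 8
            let f := PySem.Int.mod c 8
            if r ≠ tr ∧ (r - tr).natAbs = (f - tf).natAbs then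
              some (c.toNat,
                (PySem.List.pyRange (square + PySem.Int.floordiv (c - square) ((r - tr).natAbs : Int)) c
                  (PySem.Int.floordiv (c - square) ((r - tr).natAbs : Int))).map Int.toNat)
            else none)) : Nat) : Int) := by
  intro l
  induction l with
  | nil => intro n; simp [pvOrAll]
  | cons c tl ih =>
      intro n
      by_cases hg : PySem.Int.floordiv c 8 ≠ tr ∧
          (PySem.Int.floordiv c 8 - tr).natAbs = (PySem.Int.mod c 8 - tf).natAbs
      · have hsh : (1 : Int) <<< c.toNat = ((1 <<< c.toNat : Nat) : Int) := by norm_cast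
        by_cases ha : (PySem.List.pyRange
              (square + PySem.Int.floordiv (c - square) ((PySem.Int.floordiv c 8 - tr).natAbs : Int)) c
              (PySem.Int.floordiv (c - square) ((PySem.Int.floordiv c 8 - tr).natAbs : Int))).all
            (fun b => PySem.Int.band block ((1 : Int) <<< b.toNat) == 0) = true
        · have hterm : pvTerm block (c.toNat,
              (PySem.List.pyRange
                (square + PySem.Int.floordiv (c - square) ((PySem.Int.floordiv c 8 - tr).natAbs : Int)) c
                (PySem.Int.floordiv (c - square) ((PySem.Int.floordiv c 8 - tr).natAbs : Int))).map Int.toNat)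
              = 1 <<< c.toNat := by
            simp only [pvTerm, List.all_map]
            rw [if_pos]
            refine (List.all_eq_true).mpr ?_
            intro b hb
            have := (List.all_eq_true).mp ha b hb
            simp only [Function.comp, pvHit, PySem.Int.band_comm block] at this ⊢
            simpa [bne] using this
          simp only [List.foldl_cons, List.filterMap_cons, pvAltStep, if_pos hg, if_pos ha,
            hsh, PySem.Int.bor_natCast]
          rw [ih, pvOrAll_cons, hterm, Nat.lor_assoc]
        · have hterm : pvTerm block (c.toNat,
              (PySem.List.pyRange
                (square + PySem.Int.floordiv (c - square) ((PySem.Int.floordiv c 8 - tr).natAbs : Int)) c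
                (PySem.Int.floordiv (c - square) ((PySem.Int.floordiv c 8 - tr).natAbs : Int))).map Int.toNat)
              = 0 := by
            simp only [pvTerm, List.all_map]
            rw [if_neg]
            intro hall
            apply ha
            refine (List.all_eq_true).mpr ?_
            intro b hb
            have := (List.all_eq_true).mp hall b hb
            simp only [Function.comp, pvHit, PySem.Int.band_comm block] at this ⊢
            simpa [bne] using this
          simp only [List.foldl_cons, List.filterMap_cons, pvAltStep, if_pos hg, if_neg ha]
          rw [ih, pvOrAll_cons, hterm, Nat.zero_or]
      · simp only [List.foldl_cons, List.filterMap_cons, pvAltStep, if_neg hg]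
        rw [ih]

theorem pvOrAll_append (block : Int) (l1 l2 : List (Nat × List Nat)) :
    pvOrAll block (l1 ++ l2) = pvOrAll block l1 ||| pvOrAll block l2 := by
  induction l1 with
  | nil => simp [pvOrAll]
  | cons x tl ih => simp [pvOrAll, List.foldr_cons] at ih ⊢; rw [ih, Nat.lor_assoc]

theorem pvOrAll_perm (block : Int) {l l' : List (Nat × List Nat)} (h : l.Perm l') :
    pvOrAll block l = pvOrAll block l' := by
  induction h with
  | nil => rfl
  | cons x _ ih => simp [pvOrAll, List.foldr_cons] at ih ⊢; rw [ih]
  | swap x y l =>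
      simp only [pvOrAll, List.foldr_cons]
      rw [← Nat.lor_assoc, Nat.lor_comm (pvTerm block y), Nat.lor_assoc]
  | trans _ _ ih1 ih2 => exact ih1.trans ih2

theorem pvOrAll_rayPairs (block : Int) :
    ∀ (ps pre : List Nat),
      pvOrAll block (pvRayPairs pre ps)
        = if pre.all (fun b => !pvHit block b) then pvClip block ps else 0 := by
  intro ps
  induction ps with
  | nil => intro pre; simp [pvRayPairs, pvOrAll, pvClip]
  | cons p tl ih =>
      intro pre
      simp only [pvRayPairs, pvOrAll, List.foldr_cons]
      have : (List.foldr (fun x acc => pvTerm block x ||| acc) 0 (pvRayPairs (pre ++ [p]) tl))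
          = pvOrAll block (pvRayPairs (pre ++ [p]) tl) := rfl
      rw [this, ih (pre ++ [p])]
      by_cases hpre : pre.all (fun b => !pvHit block b) = true
      · by_cases hp : pvHit block p = true
        · simp [pvTerm, pvClip, hpre, hp, List.all_append]
        · simp [pvTerm, pvClip, hpre, hp, List.all_append]
      · simp [pvTerm, hpre, List.all_append]

theorem pvA_eq (sq block : Int) :
    bishop_fly_attacks sq block
      = ((((pvClip block (pvPsNE sq) ||| pvClip block (pvPsSE sq)) ||| pvClip block (pvPsNW sq))
          ||| pvClip block (pvPsSW sq) : Nat) : Int) := by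
  show pvFlyLoop block _ (pvFlyLoop block _ (pvFlyLoop block _ (pvFlyLoop block _ ((0 : Nat) : Int)))) = _
  rw [pvFlyLoop_clip, pvFlyLoop_clip, pvFlyLoop_clip, pvFlyLoop_clip]
  simp [pvPsNE, pvPsSE, pvPsNW, pvPsSW]

theorem pvB_eq (sq block : Int) :
    bishop_fly_attacks_alt sq block = ((pvOrAll block (pvDiag sq) : Nat) : Int) := by
  show (PySem.List.pyRange 0 64 1).foldl
      (pvAltStep sq block (PySem.Int.floordiv sq 8) (PySem.Int.mod sq 8)) ((0 : Nat) : Int) = _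
  rw [pvAlt_orAll]
  simp [pvDiag]

theorem pvPerSquare (sq : Int)
    (h : (pvDiag sq).Perm
      (pvRayPairs [] (pvPsNE sq) ++ (pvRayPairs [] (pvPsSE sq) ++
        (pvRayPairs [] (pvPsNW sq) ++ pvRayPairs [] (pvPsSW sq))))) (block : Int) :
    bishop_fly_attacks sq block = bishop_fly_attacks_alt sq block := by
  rw [pvA_eq, pvB_eq, pvOrAll_perm block h, pvOrAll_append, pvOrAll_append, pvOrAll_append,
    pvOrAll_rayPairs, pvOrAll_rayPairs, pvOrAll_rayPairs, pvOrAll_rayPairs]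
  simp [Nat.lor_assoc]

-- ===== VERDICT (by name: the statement is the Claim_ definition above) =====
theorem bishop_fly_attacks_spec : Claim_equal_bishop_fly_attacks := by
  unfold Claim_equal_bishop_fly_attacks
  intro square block _ hPre
  unfold Spec_bishop_fly_attacks
  obtain ⟨h0, h1⟩ := hPre
  interval_cases square <;> exact pvPerSquare _ (by decide) block
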